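-- pv_equiv track=rewrite | github.com/gamebearonline-web/spl3_X_Bot | spl3_schedule_ver0.py | align_results_to_timeline
-- ===== SOURCE A (Python) =====
-- def align_results_to_timeline(results, timeline):
--     """
--     results の中から timeline[i] の start/end に一致する枠を探して i に配置する。
--     見つからなければ空 dict を入れる（＝描画はされないが 17:00 に飛ばない）。
--     """
--     # start_time で引けるように辞書化（同startが複数なら先勝ち）
--     by_start = {}
--     for r in results or []:
--         if isinstance(r, dict) and r.get("start_time"):
--             by_start.setdefault(r["start_time"], r)
--
--     aligned = []
--     for (st, et) in timeline:
--         if st and st in by_start: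
--             aligned.append(by_start[st])
--         else:
--             aligned.append({})
--     return aligned
-- ===== SOURCE B (Python) =====
-- def align_results_to_timeline(results, timeline):
--     aligned = []
--     for (st, et) in timeline:
--         match = {}
--         if st:
--             for r in results or []:
--                 if isinstance(r, dict) and r.get("start_time") == st:
--                     match = r
--                     break
--         aligned.append(match)
--     return aligned
-- ===== Notes on version B (the rewrite author's own statement) =====
-- stated objective: simpler
-- what changed: Drops the pre-built start_time index entirely: for each timeline slot B linearly scans the results list for the first dict whose start_time equals the slot's start, instead of building a first-wins dict and looking it up.
import Mathlib
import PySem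

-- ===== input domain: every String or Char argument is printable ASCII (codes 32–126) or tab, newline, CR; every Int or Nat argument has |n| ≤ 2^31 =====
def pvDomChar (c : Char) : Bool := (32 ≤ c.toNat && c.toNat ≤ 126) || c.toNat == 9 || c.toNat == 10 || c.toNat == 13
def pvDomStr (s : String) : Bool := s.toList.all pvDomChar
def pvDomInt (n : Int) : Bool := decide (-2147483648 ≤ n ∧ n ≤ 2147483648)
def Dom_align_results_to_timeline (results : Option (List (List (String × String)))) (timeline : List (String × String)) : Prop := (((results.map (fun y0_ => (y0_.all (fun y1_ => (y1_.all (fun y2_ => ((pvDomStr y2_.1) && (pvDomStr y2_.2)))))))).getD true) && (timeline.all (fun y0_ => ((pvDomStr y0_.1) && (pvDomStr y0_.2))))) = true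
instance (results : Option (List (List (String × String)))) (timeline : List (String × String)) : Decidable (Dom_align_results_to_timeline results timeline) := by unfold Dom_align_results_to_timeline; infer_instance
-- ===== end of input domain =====

-- B drops A's pre-built start_time dict and instead scans the results list per timeline slot for the first matching dict (simpler, same values).

-- ===== PORT A =====
-- dict get: first-match association-list lookup (convention for Python dict values)
def pvGetStart (r : List (String × String)) : Option String :=
  (r.find? (fun p => p.1 == "start_time")).map (·.2)

-- 'for r in results or []: if isinstance(r, dict) and r.get("start_time"): by_start.setdefault(...)'
def pvBuildByStart : List (List (String × String)) → PySem.Dict String (List (String × String)) → PySem.Dict String (List (String × String))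
  | [], d => d
  | r :: rest, d =>
      pvBuildByStart rest
        (match pvGetStart r with
         | some s => if s != "" then PySem.Dict.setdefault d s r else d
         | none => d)

def align_results_to_timeline (results : Option (List (List (String × String)))) (timeline : List (String × String)) : List (List (String × String)) :=
  let by_start := pvBuildByStart (results.getD []) PySem.Dict.empty
  timeline.map (fun p =>
    if p.1 != "" && PySem.Dict.contains by_start p.1 then
      (PySem.Dict.get? by_start p.1).getD []   -- guarded by contains, so by_start[p.1]
    else [])

-- ===== PORT B =====
-- per-slot linear scan of results for the first dict with matching start_time
def align_results_to_timeline_alt (results : Option (List (List (String × String)))) (timeline : List (String × String)) : List (List (String × String)) :=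
  timeline.map (fun p =>
    if p.1 == "" then []
    else
      match (results.getD []).find? (fun r => pvGetStart r == some p.1) with
      | some r => r
      | none => [])

-- ===== PRECONDITION & SPEC =====
def Spec_align_results_to_timeline (results : Option (List (List (String × String)))) (timeline : List (String × String)) (out : List (List (String × String))) : Prop := out = align_results_to_timeline_alt results timeline
instance (results : Option (List (List (String × String)))) (timeline : List (String × String)) (out : List (List (String × String))) : Decidable (Spec_align_results_to_timeline results timeline out) := by unfold Spec_align_results_to_timeline; infer_instance

-- ===== CLAIM =====
def Claim_equal_align_results_to_timeline : Prop := ∀ (results : Option (List (List (String × String)))) (timeline : List (String × String)), Dom_align_results_to_timeline results timeline → Spec_align_results_to_timeline results timeline (align_results_to_timeline results timeline)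

-- ===== LEMMAS AND PROOFS =====
theorem pvBuild_get (rs : List (List (String × String))) (d : PySem.Dict String (List (String × String))) (st : String) (hst : st ≠ "") :
    PySem.Dict.get? (pvBuildByStart rs d) st =
      (PySem.Dict.get? d st).or (rs.find? (fun r => pvGetStart r == some st)) := by
  induction rs generalizing d with
  | nil => simp [pvBuildByStart]
  | cons r rest ih =>
    by_cases hm : (pvGetStart r == some st) = true
    · have hg : pvGetStart r = some st := by simpa using hm
      have hm' : (fun r => pvGetStart r == some st) r = true := hm
      rw [List.find?_cons_of_pos (p := fun r => pvGetStart r == some st) (a := r) (l := rest) hm']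
      have hsne : (st != "") = true := by simp [hst]
      simp only [pvBuildByStart, hg, hsne, if_pos]
      rw [ih]
      rw [PySem.Dict.get?_setdefault_self]
      cases d.get? st <;> simp
    · have hm' : (fun r => pvGetStart r == some st) r = false := by simpa using hm
      rw [List.find?_cons_of_neg (p := fun r => pvGetStart r == some st) (a := r) (l := rest) (by simpa using hm)]
      have hd : (match pvGetStart r with
           | some s => if s != "" then PySem.Dict.setdefault d s r else d
           | none => d).get? st = d.get? st := by
        cases hg : pvGetStart r with
        | none => rfl
        | some s =>
          by_cases hs : (s != "") = true
          · simp only [hs, if_pos]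
            apply PySem.Dict.get?_setdefault_of_ne
            intro he
            exact hm (by simp [hg, he])
          · simp [hs]
      simp only [pvBuildByStart]
      rw [ih, hd]

-- ===== VERDICT =====
theorem align_results_to_timeline_spec : Claim_equal_align_results_to_timeline := by
  intro results timeline _
  unfold Spec_align_results_to_timeline align_results_to_timeline align_results_to_timeline_alt
  apply List.map_congr_left
  intro p _
  by_cases hst : p.1 = ""
  · simp [hst]
  · have h1 : (p.1 != "") = true := by simp [hst]
    have h2 : (p.1 == "") = false := by simp [hst]
    rw [h2]
    simp only [h1, Bool.true_and]
    have hget := pvBuild_get (results.getD []) PySem.Dict.empty p.1 hst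
    rw [PySem.Dict.get?_empty, Option.none_or] at hget
    rw [PySem.Dict.contains_eq_isSome_get?, hget]
    cases hf : (results.getD []).find? (fun r => pvGetStart r == some p.1) with
    | none => simp
    | some r => simp
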